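-- pv_equiv track=rewrite | github.com/ana-e-uk/DM-Lab-Website | module-scripts/metadata/main.py | index_edges
-- ===== SOURCE A (Python) =====
-- def index_edges(edges):
--     '''
--     INPUT: edges (osmnx graph edges) - edges in the graph
--
--     OUTPUT: d (dictionary) - dict with key/value pairs where
--                                 key = each edge tuple (as a string)
--                                 value = edge index (int) (makes the edge index be one value rather than a tuple)
--     '''
--     d = {}
--     idx = 0
--
--     for e in edges:
--         u = e[0]
--         v = e[1]
--         edge = [u, v]
--
--         if str(edge) in d.keys():
--             pass
--         else:
--             d[str(edge)] = idx
--             idx += 1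
--
--     return d
-- ===== SOURCE B (Python) =====
-- def index_edges(edges):
--     keys = [str([e[0], e[1]]) for e in edges]
--     f = [k for i, k in enumerate(keys) if k not in keys[:i]]
--     return {k: f.index(k) for k in f}
-- ===== Notes on version B (the rewrite author's own statement) =====
-- stated objective: alternative
-- what changed: Replaces A's single hash-dict pass with a manual counter by a dictionary-free prefix-scan algorithm: each stringified edge is kept iff it does not occur in the prefix of keys before it, and its index is recovered afterwards with list.index over the kept list.
import Mathlib
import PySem

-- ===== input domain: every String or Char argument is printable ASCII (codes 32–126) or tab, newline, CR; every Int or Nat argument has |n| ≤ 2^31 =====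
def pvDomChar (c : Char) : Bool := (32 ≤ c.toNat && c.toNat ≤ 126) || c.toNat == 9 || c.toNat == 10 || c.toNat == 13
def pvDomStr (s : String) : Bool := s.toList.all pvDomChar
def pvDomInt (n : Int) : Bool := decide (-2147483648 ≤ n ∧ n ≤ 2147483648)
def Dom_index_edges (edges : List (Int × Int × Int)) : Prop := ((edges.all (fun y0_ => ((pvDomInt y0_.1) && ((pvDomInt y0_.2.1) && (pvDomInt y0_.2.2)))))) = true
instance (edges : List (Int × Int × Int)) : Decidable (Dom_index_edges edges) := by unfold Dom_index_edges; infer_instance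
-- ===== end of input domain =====

-- B replaces A's one-pass hash-dict-with-counter by a dictionary-free prefix-scan algorithm
-- (keep a key iff it is absent from the prefix before it; recover indices with list.index).

-- str([u, v]) for ints u, v: "[" ++ str(u) ++ ", " ++ str(v) ++ "]" (exact for an int list of length 2)
def pvKey (e : Int × Int × Int) : String :=
  String.ofList ('[' :: (PySem.Int.toChars e.1 ++ ',' :: ' ' :: PySem.Int.toChars e.2.1 ++ [']']))

-- ===== PORT A =====
def index_edges (edges : List (Int × Int × Int)) : List (String × Int) :=
  (edges.foldl
    (fun (st : PySem.Dict String Int × Int) e =>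
      -- edge = [u, v]; the key is str(edge) = pvKey e
      if st.1.contains (pvKey e) then st
      else (st.1.insert (pvKey e) st.2, st.2 + 1))
    (PySem.Dict.empty, 0)).1.items

-- ===== PORT B =====
-- f.index(k): Python raises ValueError when k ∉ f; in B every k comes from f, so the none arm is unreachable
def pvIndexVal (f : List String) (k : String) : Int :=
  match PySem.List.index? f k with
  | some i => (i : Int)
  | none => 0

-- the comprehension [k for i, k in enumerate(keys) if k not in keys[:i]]
def pvFirsts (keys : List String) : List String :=
  (PySem.List.enumerate keys 0).filterMap
      (fun p => if p.2 ∈ PySem.List.slice keys none (some p.1) then none else some p.2)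

-- the dict comprehension {k: f.index(k) for k in f}
def pvDictOf (f : List String) : List (String × Int) :=
  (f.foldl (fun d k => d.insert k (pvIndexVal f k)) PySem.Dict.empty).items

def index_edges_alt (edges : List (Int × Int × Int)) : List (String × Int) :=
  pvDictOf (pvFirsts (edges.map pvKey))

-- ===== PRECONDITION & SPEC =====
def Spec_index_edges (edges : List (Int × Int × Int)) (out : List (String × Int)) : Prop := out = index_edges_alt edges
instance (edges : List (Int × Int × Int)) (out : List (String × Int)) : Decidable (Spec_index_edges edges out) := by unfold Spec_index_edges; infer_instance

-- ===== CLAIM (what is proved, stated in full; the proofs are below) =====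
def Claim_equal_index_edges : Prop := ∀ (edges : List (Int × Int × Int)), Dom_index_edges edges → Spec_index_edges edges (index_edges edges)

-- ===== LEMMAS AND PROOFS =====

-- the dict A has built after seeing first-occurrence keys ks, as a function of ks
def mkD (ks : List String) : PySem.Dict String Int :=
  PySem.Dict.mk ((PySem.List.enumerate ks 0).map (fun p => (p.2, p.1)))

theorem keys_mkD (ks : List String) : (mkD ks).keys = ks := by
  simp [mkD, PySem.Dict.keys, List.map_map, Function.comp_def]

theorem loop_inv (l : List (Int × Int × Int)) (ks : List String) (hnd : ks.Nodup) :
    l.foldl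
      (fun (st : PySem.Dict String Int × Int) e =>
        if st.1.contains (pvKey e) then st else (st.1.insert (pvKey e) st.2, st.2 + 1))
      (mkD ks, (ks.length : Int))
    = (mkD (PySem.Set.update ks (l.map pvKey)),
       ((PySem.Set.update ks (l.map pvKey)).length : Int)) := by
  induction l generalizing ks with
  | nil => simp [PySem.Set.update]
  | cons e l ih =>
    have hc : (mkD ks).contains (pvKey e) = decide (pvKey e ∈ ks) := by
      rw [PySem.Dict.contains_eq_decide_mem_keys, keys_mkD]
    by_cases hk : pvKey e ∈ ks
    · have hct : (mkD ks).contains (pvKey e) = true := by simp [hc, hk]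
      have hadd : PySem.Set.add ks (pvKey e) = ks := by
        simp [PySem.Set.add, PySem.Set.contains, hk]
      simp only [List.foldl_cons, hct, if_true, List.map_cons]
      have := ih ks hnd
      simp only [PySem.Set.update, List.foldl_cons, hadd] at this ⊢
      exact this
    · have hcf : (mkD ks).contains (pvKey e) = false := by simp [hc, hk]
      have hins : (mkD ks).insert (pvKey e) (ks.length : Int) = mkD (ks ++ [pvKey e]) := by
        apply PySem.Dict.ext
        rw [PySem.Dict.items_insert, hcf]
        simp [mkD, PySem.List.enumerate_append]
      have hadd : PySem.Set.add ks (pvKey e) = ks ++ [pvKey e] := by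
        simp [PySem.Set.add, PySem.Set.contains, hk]
      have hnd' : (ks ++ [pvKey e]).Nodup := by
        simp [List.nodup_append, hnd]
        intro a ha h
        exact hk (h ▸ ha)
      simp only [List.foldl_cons, hcf, Bool.false_eq_true, if_false, List.map_cons]
      rw [hins]
      have := ih (ks ++ [pvKey e]) hnd'
      simp only [PySem.Set.update, List.foldl_cons, hadd] at this ⊢
      simpa using this

-- B's prefix-scan comprehension computes exactly the ordered-dedup accumulation of Set.update
theorem filter_inv (l pre acc : List String) (hmem : ∀ y, y ∈ acc ↔ y ∈ pre) :
    PySem.Set.update acc l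
      = acc ++ (PySem.List.enumerate l (pre.length : Int)).filterMap
          (fun p => if p.2 ∈ PySem.List.slice (pre ++ l) none (some p.1) then none else some p.2) := by
  induction l generalizing pre acc with
  | nil => simp [PySem.Set.update, PySem.List.enumerate_nil]
  | cons x t ih =>
    have hslice : PySem.List.slice (pre ++ x :: t) none (some (pre.length : Int))
        = pre := by
      rw [PySem.List.slice_to _ (by positivity)]
      simp
    have hlen : (pre.length : Int) + 1 = ((pre ++ [x]).length : Int) := by
      simp
    have happ : pre ++ x :: t = (pre ++ [x]) ++ t := by simp
    rw [PySem.List.enumerate_cons]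
    by_cases hx : x ∈ pre
    · have hxa : x ∈ acc := (hmem x).mpr hx
      have hadd : PySem.Set.add acc x = acc := PySem.Set.add_of_mem hxa
      have hmem' : ∀ y, y ∈ acc ↔ y ∈ pre ++ [x] := by
        intro y
        constructor
        · intro h; exact List.mem_append_left _ ((hmem y).mp h)
        · intro h
          rcases List.mem_append.mp h with h | h
          · exact (hmem y).mpr h
          · simp at h; subst h; exact hxa
      have := ih (pre ++ [x]) acc hmem'
      simp only [PySem.Set.update, List.foldl_cons, hadd]
      rw [List.filterMap_cons]
      simp only [hslice, if_pos hx]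
      rw [hlen, happ]
      exact this
    · have hxa : x ∉ acc := fun h => hx ((hmem x).mp h)
      have hadd : PySem.Set.add acc x = acc ++ [x] := PySem.Set.add_of_not_mem hxa
      have hmem' : ∀ y, y ∈ acc ++ [x] ↔ y ∈ pre ++ [x] := by
        intro y; simp [hmem y]
      have := ih (pre ++ [x]) (acc ++ [x]) hmem'
      simp only [PySem.Set.update, List.foldl_cons, hadd]
      rw [List.filterMap_cons]
      simp only [hslice, if_neg hx]
      rw [hlen, happ]
      simp only [PySem.Set.update] at this
      rw [this]
      simp

theorem nodup_getElem_not_mem_take (l : List String) (hl : l.Nodup) (i : Nat) (hi : i < l.length) :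
    l[i] ∉ l.take i := by
  intro hmem
  rcases List.mem_take_iff_getElem.mp hmem with ⟨j, hj, hji⟩
  have hj1 : j < i := lt_of_lt_of_le hj (min_le_left _ _)
  have hj2 : j < l.length := lt_of_lt_of_le hj (min_le_right _ _)
  have hji' : l[j] = l[i] := by simpa using hji
  have : j = i := (List.Nodup.getElem_inj_iff hl).mp hji'
  omega

theorem index?_getElem_of_nodup (l : List String) (hl : l.Nodup) (i : Nat) (hi : i < l.length) :
    PySem.List.index? l l[i] = some i := by
  rw [PySem.List.index?_eq_some_iff]
  refine ⟨l.take i, l.drop (i + 1), ?_, ?_, nodup_getElem_not_mem_take l hl i hi⟩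
  · rw [← List.drop_eq_getElem_cons hi, List.take_append_drop]
  · simp
    omega

-- indexing a nodup list with list.index enumerates it
theorem map_index_eq_enumerate (l : List String) (hl : l.Nodup) :
    l.map (fun k => (k, pvIndexVal l k)) = (PySem.List.enumerate l 0).map (fun p => (p.2, p.1)) := by
  apply List.ext_getElem
  · simp [PySem.List.length_enumerate]
  · intro i h1 h2
    have hi : i < l.length := by simpa using h1
    simp only [List.getElem_map, PySem.List.getElem_enumerate]
    have : pvIndexVal l l[i] = (i : Int) := by
      unfold pvIndexVal
      rw [index?_getElem_of_nodup l hl i hi]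
    simp [this]

-- ===== VERDICT (by name: the statement is the Claim_ definition above) =====
theorem index_edges_spec : Claim_equal_index_edges := by
  intro edges _
  show index_edges edges = index_edges_alt edges
  unfold index_edges index_edges_alt pvDictOf
  rw [show (PySem.Dict.empty : PySem.Dict String Int) = mkD [] from rfl,
      show (0 : Int) = ((List.length ([] : List String) : Nat) : Int) from rfl,
      loop_inv edges [] List.nodup_nil]
  have hf : PySem.Set.update ([] : List String) (edges.map pvKey)
      = pvFirsts (edges.map pvKey) := by
    have := filter_inv (edges.map pvKey) [] [] (by simp)
    simpa [pvFirsts] using this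
  rw [← hf]
  have hnd : (PySem.Set.update ([] : List String) (edges.map pvKey)).Nodup := by
    rw [show PySem.Set.update ([] : List String) (edges.map pvKey)
          = PySem.Set.ofList (edges.map pvKey) from rfl]
    exact PySem.Set.nodup_ofList _
  have hfold : ((PySem.Set.update ([] : List String) (edges.map pvKey)).foldl
      (fun d k => d.insert k (pvIndexVal (PySem.Set.update ([] : List String) (edges.map pvKey)) k))
      (mkD [])).items
      = (PySem.Set.update ([] : List String) (edges.map pvKey)).map
          (fun k => (k, pvIndexVal (PySem.Set.update ([] : List String) (edges.map pvKey)) k)) := by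
    rw [show (mkD [] : PySem.Dict String Int) = PySem.Dict.empty from rfl]
    rw [PySem.Dict.items_foldl_insert_fresh (PySem.Set.update ([] : List String) (edges.map pvKey))
      (fun a => a) (fun a => pvIndexVal (PySem.Set.update ([] : List String) (edges.map pvKey)) a)
      PySem.Dict.empty (by intro a _; simp [PySem.Dict.empty]) (by simpa using hnd)]
    simp [PySem.Dict.empty]
  rw [hfold, map_index_eq_enumerate _ hnd]
  rfl
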